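-- pv_equiv track=rewrite | github.com/sssamuelll/copyclip | src/copyclip/minimizer.py | _jsts_collect_top_imports
-- ===== SOURCE A (Python) =====
-- from typing import Dict, List, Optional, Tuple, Set
--
-- def _jsts_collect_top_imports(content: str) -> List[str]:
--     lines = content.splitlines()
--     out: List[str] = []
--     for ln in lines:
--         t = ln.strip()
--         if not t:
--             continue
--         if (t.startswith("import ")
--             or (t.startswith("export ") and " from " in t)
--             or t.startswith("require(")):
--             out.append(ln.rstrip())
--             continue
--         if out:  # primera no-import -> cortar
--             break
--         if t.startswith("//") or t.startswith("/*"):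
--             continue
--     return out
-- ===== SOURCE B (Python) =====
-- from typing import List
--
-- def _is_import_line(t: str) -> bool:
--     return (t.startswith("import ")
--             or (t.startswith("export ") and " from " in t)
--             or t.startswith("require("))
--
-- def _jsts_collect_top_imports(content: str) -> List[str]:
--     lines = content.splitlines()
--     # pass 1: find the first import-like line (everything before it is skipped)
--     start = None
--     for i, ln in enumerate(lines):
--         if _is_import_line(ln.strip()):
--             start = i
--             break
--     if start is None:
--         return []
--     # pass 2: collect the import block, tolerating blank lines, stop at first other line
--     out: List[str] = []
--     for ln in lines[start:]:
--         t = ln.strip()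
--         if not t:
--             continue
--         if _is_import_line(t):
--             out.append(ln.rstrip())
--         else:
--             break
--     return out
-- ===== Notes on version B (the rewrite author's own statement) =====
-- stated objective: simpler
-- what changed: Replaces A's one-pass state machine (whose break/continue behaviour depends on whether output has started) with an explicit two-phase shape: find the first import-like line, then collect the contiguous import block from there, with the import test factored into a shared predicate.
import Mathlib
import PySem

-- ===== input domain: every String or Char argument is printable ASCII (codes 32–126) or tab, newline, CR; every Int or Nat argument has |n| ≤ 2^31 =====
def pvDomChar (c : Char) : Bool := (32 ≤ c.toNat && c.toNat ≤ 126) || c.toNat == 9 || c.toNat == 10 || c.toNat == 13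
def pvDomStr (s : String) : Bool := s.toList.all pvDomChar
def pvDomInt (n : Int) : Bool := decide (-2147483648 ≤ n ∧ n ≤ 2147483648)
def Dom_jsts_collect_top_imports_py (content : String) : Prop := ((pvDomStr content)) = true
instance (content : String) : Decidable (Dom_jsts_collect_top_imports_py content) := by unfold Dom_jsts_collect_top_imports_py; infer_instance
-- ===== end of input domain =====

-- B restructures A's one-pass break/continue state machine into an explicit two-phase
-- "skip preamble to the first import-like line, then collect the block" shape (objective: simpler).


-- ===== PORT A =====
-- loop over lines with accumulator `out`; `break` = return out
def pvALoop : List String → List String → List String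
  | [], out => out
  | ln :: rest, out =>
    let t := PySem.Str.strip ln
    if t = "" then pvALoop rest out
    else if PySem.Str.startswith t "import "
         || (PySem.Str.startswith t "export " && PySem.Str.isIn " from " t)
         || PySem.Str.startswith t "require(" then
      pvALoop rest (out ++ [PySem.Str.rstrip ln])
    else if out ≠ [] then out  -- primera no-import -> cortar
    else if PySem.Str.startswith t "//" || PySem.Str.startswith t "/*" then pvALoop rest out
    else pvALoop rest out

def jsts_collect_top_imports_py (content : String) : List String :=
  pvALoop (PySem.Str.splitlines content) []

-- ===== PORT B =====
def pvIsImportLine (t : String) : Bool :=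
  PySem.Str.startswith t "import "
  || (PySem.Str.startswith t "export " && PySem.Str.isIn " from " t)
  || PySem.Str.startswith t "require("

-- pass 1: drop the preamble, returning the suffix starting at the first import-like line
def pvFindStart : List String → Option (List String)
  | [] => none
  | ln :: rest => if pvIsImportLine (PySem.Str.strip ln) then some (ln :: rest) else pvFindStart rest

-- pass 2: collect the import block, skipping blanks, stopping at the first other line
def pvBCollect : List String → List String → List String
  | [], out => out
  | ln :: rest, out =>
    let t := PySem.Str.strip ln
    if t = "" then pvBCollect rest out
    else if pvIsImportLine t then pvBCollect rest (out ++ [PySem.Str.rstrip ln])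
    else out

def jsts_collect_top_imports_py_alt (content : String) : List String :=
  match pvFindStart (PySem.Str.splitlines content) with
  | none => []
  | some suffix => pvBCollect suffix []

-- ===== PRECONDITION & SPEC =====
def Spec_jsts_collect_top_imports_py (content : String) (out : List String) : Prop := out = jsts_collect_top_imports_py_alt content
instance (content : String) (out : List String) : Decidable (Spec_jsts_collect_top_imports_py content out) := by unfold Spec_jsts_collect_top_imports_py; infer_instance

-- ===== CLAIM (what is proved, stated in full; the proofs are below) =====
def Claim_equal_jsts_collect_top_imports_py : Prop := ∀ (content : String), Dom_jsts_collect_top_imports_py content → Spec_jsts_collect_top_imports_py content (jsts_collect_top_imports_py content)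

-- ===== LEMMAS AND PROOFS =====

-- A's cons step, with the import test folded to pvIsImportLine and the no-op comment branch collapsed
theorem pvALoop_cons (ln : String) (rest out : List String) :
    pvALoop (ln :: rest) out =
      if PySem.Str.strip ln = "" then pvALoop rest out
      else if pvIsImportLine (PySem.Str.strip ln) then pvALoop rest (out ++ [PySem.Str.rstrip ln])
      else if out ≠ [] then out
      else pvALoop rest out := by
  simp only [pvALoop, pvIsImportLine, ite_self]
  rfl

-- collection phase: once out ≠ [], A's loop and B's collector agree
theorem pvALoop_eq_pvBCollect (ls : List String) (out : List String) (h : out ≠ []) :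
    pvALoop ls out = pvBCollect ls out := by
  induction ls generalizing out with
  | nil => rfl
  | cons ln rest ih =>
    rw [pvALoop_cons]
    simp only [pvBCollect]
    by_cases hb : PySem.Str.strip ln = ""
    · rw [if_pos hb, if_pos hb]; exact ih out h
    · rw [if_neg hb, if_neg hb]
      by_cases hi : pvIsImportLine (PySem.Str.strip ln) = true
      · rw [if_pos hi, if_pos hi]; exact ih _ (by simp)
      · rw [if_neg hi, if_neg hi, if_pos h]

-- preamble phase: with empty accumulator, A's loop skips exactly to pvFindStart's suffix
theorem pvALoop_nil_eq (ls : List String) :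
    pvALoop ls [] = (match pvFindStart ls with
      | none => []
      | some suffix => pvBCollect suffix []) := by
  induction ls with
  | nil => rfl
  | cons ln rest ih =>
    rw [pvALoop_cons]
    simp only [pvFindStart]
    by_cases hi : pvIsImportLine (PySem.Str.strip ln) = true
    · have hnb : ¬ PySem.Str.strip ln = "" := by
        intro h; rw [h] at hi; exact absurd hi (by decide)
      rw [if_neg hnb, if_pos hi, if_pos hi]
      have hB : pvBCollect (ln :: rest) [] = pvBCollect rest [PySem.Str.rstrip ln] := by
        simp only [pvBCollect]
        rw [if_neg hnb, if_pos hi]; rfl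
      show pvALoop rest ([] ++ [PySem.Str.rstrip ln]) = pvBCollect (ln :: rest) []
      rw [hB, List.nil_append]
      exact pvALoop_eq_pvBCollect rest [PySem.Str.rstrip ln] (by simp)
    · have hi' : pvIsImportLine (PySem.Str.strip ln) = false := by simpa using hi
      simp only [hi', Bool.false_eq_true, ite_false]
      by_cases hb : PySem.Str.strip ln = ""
      · rw [if_pos hb]; exact ih
      · rw [if_neg hb, if_neg (by simp : ¬ ([] : List String) ≠ [])]; exact ih

-- ===== VERDICT (by name: the statement is the Claim_ definition above) =====
theorem jsts_collect_top_imports_py_spec : Claim_equal_jsts_collect_top_imports_py := by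
  intro content _
  unfold Spec_jsts_collect_top_imports_py jsts_collect_top_imports_py jsts_collect_top_imports_py_alt
  exact pvALoop_nil_eq _
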